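-- pv_equiv track=rewrite | github.com/bergaeduardo/Adminweb | herramientas/views.py | formatear_orden_compra
-- ===== SOURCE A (Python) =====
-- def formatear_orden_compra(orden_compra):
--     """
--     Formatea el campo orden_compra para mostrar de forma legible.
--     Convierte formatos como "['OC1', 'OC2']" o "OC1|OC2" en "OC1, OC2"
--     """
--     if not orden_compra:
--         return ''
--
--     oc_str = str(orden_compra)
--
--     # Remover corchetes y comillas de formato lista Python
--     oc_str = oc_str.replace('[', '').replace(']', '').replace("'", '').replace('"', '')
--
--     # Reemplazar pipes por comas
--     oc_str = oc_str.replace('|', ', ')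
--
--     # Limpiar espacios extras
--     oc_str = ', '.join([oc.strip() for oc in oc_str.split(',') if oc.strip()])
--
--     return oc_str
-- ===== SOURCE B (Python) =====
-- def formatear_orden_compra(orden_compra):
--     if not orden_compra:
--         return ''
--     tokens = []
--     cur = []
--     for ch in str(orden_compra):
--         if ch in "[]'\"":
--             continue
--         if ch == ',' or ch == '|':
--             tok = ''.join(cur).strip()
--             if tok:
--                 tokens.append(tok)
--             cur = []
--         else:
--             cur.append(ch)
--     tok = ''.join(cur).strip()
--     if tok:
--         tokens.append(tok)
--     return ', '.join(tokens)
-- ===== Notes on version B (the rewrite author's own statement) =====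
-- stated objective: alternative
-- what changed: Replaced A's multi-pass pipeline (four replace passes, a pipe-to-comma replace, a split, then strip/filter/join) by a single left-to-right character scan that classifies each character (skip bracket/quote, finalize the stripped current token on ',' or '|', otherwise extend it) and joins the collected tokens once.
import Mathlib
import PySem

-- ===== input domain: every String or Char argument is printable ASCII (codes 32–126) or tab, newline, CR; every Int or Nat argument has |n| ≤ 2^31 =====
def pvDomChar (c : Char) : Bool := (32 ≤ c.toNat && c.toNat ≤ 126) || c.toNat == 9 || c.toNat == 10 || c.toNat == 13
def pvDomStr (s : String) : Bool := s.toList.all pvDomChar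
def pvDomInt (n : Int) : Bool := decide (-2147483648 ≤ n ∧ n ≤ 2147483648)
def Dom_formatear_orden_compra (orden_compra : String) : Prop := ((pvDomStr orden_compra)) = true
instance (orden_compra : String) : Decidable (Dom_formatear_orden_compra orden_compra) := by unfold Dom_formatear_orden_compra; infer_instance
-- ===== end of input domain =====

-- B replaces A's multi-pass replace/replace/split/strip pipeline by one left-to-right
-- character scan that classifies each character (skip bracket/quote, finalize token on
-- ',' or '|', else extend the current token); objective: alternative single-pass algorithm.

-- ===== PORT A =====
def formatear_orden_compra (orden_compra : String) : String :=
  if orden_compra = "" then ""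
  else
    -- oc_str.replace('[','').replace(']','').replace("'",'').replace('"','')
    let oc1 : List Char :=
      PySem.Chars.replace (PySem.Chars.replace (PySem.Chars.replace (PySem.Chars.replace
        orden_compra.toList ['['] []) [']'] []) ['\''] []) ['"'] []
    -- oc_str.replace('|', ', ')
    let oc2 : List Char := PySem.Chars.replace oc1 ['|'] [',', ' ']
    -- ', '.join([oc.strip() for oc in oc_str.split(',') if oc.strip()])
    String.ofList (PySem.Chars.join [',', ' ']
      (((PySem.Chars.splitOn oc2 [',']).filter
          (fun oc => !(PySem.Chars.strip oc).isEmpty)).map (fun oc => PySem.Chars.strip oc)))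

-- ===== PORT B =====
-- finalize the current token: strip it and append it to the token list iff non-empty
def altFinalize (cur : List Char) (tokens : List (List Char)) : List (List Char) :=
  let tok := PySem.Chars.strip cur
  if tok.isEmpty then tokens else tokens ++ [tok]

-- the scan loop of B: skip bracket/quote chars, finalize on ',' / '|', else extend cur
def altGo : List Char → List Char → List (List Char) → List (List Char)
  | [], cur, tokens => altFinalize cur tokens
  | c :: rest, cur, tokens =>
    if c = '[' ∨ c = ']' ∨ c = '\'' ∨ c = '"' then altGo rest cur tokens
    else if c = ',' ∨ c = '|' then altGo rest [] (altFinalize cur tokens)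
    else altGo rest (cur ++ [c]) tokens

def formatear_orden_compra_alt (orden_compra : String) : String :=
  if orden_compra = "" then ""
  else String.ofList (PySem.Chars.join [',', ' '] (altGo orden_compra.toList [] []))

-- ===== PRECONDITION & SPEC =====
def Spec_formatear_orden_compra (orden_compra : String) (out : String) : Prop := out = formatear_orden_compra_alt orden_compra
instance (orden_compra : String) (out : String) : Decidable (Spec_formatear_orden_compra orden_compra out) := by unfold Spec_formatear_orden_compra; infer_instance

-- ===== CLAIM (what is proved, stated in full; the proofs are below) =====
def Claim_equal_formatear_orden_compra : Prop := ∀ (orden_compra : String), Dom_formatear_orden_compra orden_compra → Spec_formatear_orden_compra orden_compra (formatear_orden_compra orden_compra)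

-- ===== LEMMAS AND PROOFS =====

-- characters A's replaces delete
def notQuote (c : Char) : Bool := !(c == '[' || c == ']' || c == '\'' || c == '"')
-- A's pipe replacement, per character
def rep (c : Char) : List Char := if c = '|' then [',', ' '] else [c]
-- split on ',' only (what A's split does)
def splitC : List Char → List (List Char)
  | [] => [[]]
  | c :: t => if c = ',' then [] :: splitC t else (splitC t).modifyHead (c :: ·)
-- split on ',' of the pipe-replaced string, expressed on the original string
def splitR : List Char → List (List Char)
  | [] => [[]]
  | c :: t =>
    if c = ',' then [] :: splitR t
    else if c = '|' then [] :: (splitR t).modifyHead (' ' :: ·)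
    else (splitR t).modifyHead (c :: ·)
-- split on ',' or '|' (what B's scan does)
def splitD : List Char → List (List Char)
  | [] => [[]]
  | c :: t => if c = ',' ∨ c = '|' then [] :: splitD t else (splitD t).modifyHead (c :: ·)

def nonnil (t : List Char) : Bool := !t.isEmpty

theorem replaceGo_single (c : Char) (new : List Char) :
    ∀ (fuel : Nat) (l acc : List Char), l.length ≤ fuel →
      PySem.Chars.replace.go [c] new fuel l acc
        = acc.reverse ++ l.flatMap (fun x => if x = c then new else [x]) := by
  intro fuel
  induction fuel with
  | zero => intro l acc h; cases l with
    | nil => simp [PySem.Chars.replace.go]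
    | cons a t => simp at h
  | succ n ih =>
    intro l acc h
    cases l with
    | nil => simp [PySem.Chars.replace.go]
    | cons a t =>
      simp only [PySem.Chars.replace.go, List.isPrefixOf]
      by_cases hac : a = c
      · simp [hac, ih t _ (by simpa using h)]
      · simp [hac, Ne.symm hac, ih t _ (by simpa using h), List.flatMap_cons]

theorem replace_single (l : List Char) (c : Char) (new : List Char) :
    PySem.Chars.replace l [c] new = l.flatMap (fun x => if x = c then new else [x]) := by
  simp [PySem.Chars.replace, replaceGo_single c new l.length l [] le_rfl]

theorem replace_erase (l : List Char) (c : Char) :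
    PySem.Chars.replace l [c] [] = l.filter (fun x => x != c) := by
  rw [replace_single]
  induction l with
  | nil => rfl
  | cons a t ih => by_cases h : a = c <;> simp [h, ih]

theorem chain_filter (l : List Char) :
    PySem.Chars.replace (PySem.Chars.replace (PySem.Chars.replace (PySem.Chars.replace
      l ['['] []) [']'] []) ['\''] []) ['"'] [] = l.filter notQuote := by
  simp only [replace_erase, List.filter_filter]
  apply List.filter_congr
  intro x _
  cases h1 : x == '[' <;> cases h2 : x == ']' <;> cases h3 : x == '\'' <;> cases h4 : x == '"' <;>
    simp [notQuote, bne, h1, h2, h3, h4]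

theorem splitOnGo_comma :
    ∀ (fuel : Nat) (l cur : List Char) (acc : List (List Char)), l.length < fuel →
      PySem.Chars.splitOn.go [','] fuel l cur acc
        = acc.reverse ++ (splitC l).modifyHead (cur.reverse ++ ·) := by
  intro fuel
  induction fuel with
  | zero => intro l cur acc h; simp at h
  | succ n ih =>
    intro l cur acc h
    cases l with
    | nil => simp [PySem.Chars.splitOn.go, splitC]
    | cons a t =>
      simp only [PySem.Chars.splitOn.go, List.isPrefixOf]
      by_cases hac : a = ','
      · have ht : t.length < n := by simpa using h
        simp [hac, ih t [] _ ht, splitC]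
        cases splitC t <;> simp
      · have ht : t.length < n := by simpa using h
        simp [Ne.symm hac, ih t (a :: cur) acc ht, splitC, hac,
          List.modifyHead_modifyHead, Function.comp_def]

theorem splitOn_comma (l : List Char) : PySem.Chars.splitOn l [','] = splitC l := by
  simp [PySem.Chars.splitOn, splitOnGo_comma (l.length + 1) l [] [] (by omega)]
  cases hs : splitC l <;> simp

theorem splitC_flatMap (l : List Char) : splitC (l.flatMap rep) = splitR l := by
  induction l with
  | nil => rfl
  | cons a t ih =>
    by_cases h1 : a = ','
    · simp [rep, splitC, splitR, h1, ih]
    · by_cases h2 : a = '|'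
      · simp [rep, splitC, splitR, h2, ← ih]
      · simp [rep, splitC, splitR, h1, h2, ih]

theorem strip_space (h : List Char) : PySem.Chars.strip (' ' :: h) = PySem.Chars.strip h := by
  simp [PySem.Chars.strip, PySem.Chars.lstrip, PySem.Chars.isspace]

-- the heads of splitR/splitD agree, and the tails agree after stripping
theorem splitR_splitD :
    ∀ (l : List Char), ∃ h t t', splitR l = h :: t ∧ splitD l = h :: t' ∧
      t.map PySem.Chars.strip = t'.map PySem.Chars.strip := by
  intro l
  induction l with
  | nil => exact ⟨[], [], [], rfl, rfl, rfl⟩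
  | cons a r ih =>
    obtain ⟨h0, t0, t0', hR, hD, hmap⟩ := ih
    by_cases h1 : a = ','
    · refine ⟨[], splitR r, splitD r, by simp [splitR, h1], by simp [splitD, h1], ?_⟩
      simp [hR, hD, hmap]
    · by_cases h2 : a = '|'
      · refine ⟨[], (splitR r).modifyHead (' ' :: ·), splitD r,
          by simp [splitR, h2], by simp [splitD, h2], ?_⟩
        simp [hR, hD, strip_space, hmap]
      · refine ⟨a :: h0, t0, t0', ?_, ?_, hmap⟩
        · simp [splitR, h1, h2, hR]
        · simp [splitD, h1, h2, hD]

theorem splitR_map_strip (l : List Char) :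
    (splitR l).map PySem.Chars.strip = (splitD l).map PySem.Chars.strip := by
  obtain ⟨h0, t0, t0', hR, hD, hmap⟩ := splitR_splitD l
  simp [hR, hD, hmap]

theorem mapstrip_filter (X : List (List Char)) :
    (X.filter (fun oc => !(PySem.Chars.strip oc).isEmpty)).map (fun oc => PySem.Chars.strip oc)
      = (X.map PySem.Chars.strip).filter nonnil := by
  induction X with
  | nil => rfl
  | cons h t ih =>
    by_cases hh : (PySem.Chars.strip h).isEmpty <;>
      simp [nonnil, hh, ih]

theorem altFinalize_eq (cur : List Char) (tokens : List (List Char)) :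
    altFinalize cur tokens = tokens ++ [PySem.Chars.strip cur].filter nonnil := by
  unfold altFinalize nonnil
  cases h : (PySem.Chars.strip cur).isEmpty <;> simp [h]

theorem altGo_invariant :
    ∀ (cs cur : List Char) (tokens : List (List Char)),
      altGo cs cur tokens
        = tokens ++ (((splitD (cs.filter notQuote)).modifyHead (cur ++ ·)).map
            PySem.Chars.strip).filter nonnil := by
  intro cs
  induction cs with
  | nil => intro cur tokens; simp [altGo, altFinalize_eq, splitD]
  | cons c rest ih =>
    intro cur tokens
    by_cases hq : c = '[' ∨ c = ']' ∨ c = '\'' ∨ c = '"'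
    · have hnq : notQuote c = false := by
        rcases hq with h | h | h | h <;> simp [h, notQuote]
      simp [altGo, hq, ih, hnq]
    · have hnq : notQuote c = true := by
        simp only [notQuote, Bool.not_eq_eq_eq_not, Bool.not_true]
        simp only [Bool.or_eq_false_iff, beq_eq_false_iff_ne]
        tauto
      by_cases hd : c = ',' ∨ c = '|'
      · rw [show altGo (c :: rest) cur tokens = altGo rest [] (altFinalize cur tokens) by
          simp [altGo, hq, hd]]
        rw [ih, altFinalize_eq]
        rw [show List.filter notQuote (c :: rest) = c :: rest.filter notQuote by
          simp [hnq]]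
        rw [show splitD (c :: rest.filter notQuote) = [] :: splitD (rest.filter notQuote) by
          simp [splitD, hd]]
        simp only [List.filter_cons, List.append_assoc, List.modifyHead_cons,
          List.append_nil, List.filter_nil]
        by_cases hP : nonnil (PySem.Chars.strip cur) = true <;>
          cases hX : splitD (List.filter notQuote rest) <;> simp [hP]
      · rw [show altGo (c :: rest) cur tokens = altGo rest (cur ++ [c]) tokens by
          simp [altGo, hq, hd]]
        rw [ih]
        rw [show List.filter notQuote (c :: rest) = c :: rest.filter notQuote by
          simp [hnq]]
        rw [show splitD (c :: rest.filter notQuote)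
              = (splitD (rest.filter notQuote)).modifyHead (c :: ·) by simp [splitD, hd]]
        rw [List.modifyHead_modifyHead]
        simp [Function.comp_def, List.append_assoc]

-- A's pipeline, reduced to the canonical token list
theorem A_list (l : List Char) :
    ((PySem.Chars.splitOn (PySem.Chars.replace (PySem.Chars.replace (PySem.Chars.replace
        (PySem.Chars.replace (PySem.Chars.replace l ['['] []) [']'] []) ['\''] []) ['"'] [])
        ['|'] [',', ' ']) [',']).filter
          (fun oc => !(PySem.Chars.strip oc).isEmpty)).map (fun oc => PySem.Chars.strip oc)
      = ((splitD (l.filter notQuote)).map PySem.Chars.strip).filter nonnil := by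
  rw [chain_filter, replace_single, splitOn_comma]
  rw [show (fun x => if x = '|' then [',', ' '] else [x]) = rep from rfl]
  rw [splitC_flatMap, mapstrip_filter, splitR_map_strip]

-- B's scan, reduced to the same canonical token list
theorem B_list (l : List Char) :
    altGo l [] [] = ((splitD (l.filter notQuote)).map PySem.Chars.strip).filter nonnil := by
  rw [altGo_invariant]
  cases h : splitD (l.filter notQuote) <;> simp

-- ===== VERDICT (by name: the statement is the Claim_ definition above) =====
theorem formatear_orden_compra_spec : Claim_equal_formatear_orden_compra := by
  intro s _
  unfold Spec_formatear_orden_compra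
  by_cases hs : s = ""
  · simp [formatear_orden_compra, formatear_orden_compra_alt, hs]
  · simp only [formatear_orden_compra, formatear_orden_compra_alt, hs, if_false]
    rw [A_list, B_list]
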